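-- pv_equiv track=rewrite | github.com/Masss12345/Toxic_comment_detection | Toxic comment Detection/new.py | index_encoding
-- ===== SOURCE A (Python) =====
-- def index_encoding(sentences, raw_sent):
--     word2idx = {}
--     idx2word = {}
--     ctr = 1
--     for sentence in sentences:
--         for word in sentence:
--             if word not in word2idx.keys():
--                 word2idx[word] = ctr
--                 idx2word[ctr] = word
--                 ctr += 1
--     results = []
--     for sent in raw_sent:
--         results.append([word2idx[word] for word in sent])
--     return results
-- ===== SOURCE B (Python) =====
-- def index_encoding(sentences, raw_sent):
--     flat = [w for s in sentences for w in s]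
--     return [[len(set(flat[:flat.index(w)])) + 1 for w in sent]
--             for sent in raw_sent]
-- ===== Notes on version B (the rewrite author's own statement) =====
-- stated objective: alternative
-- what changed: B builds no word-to-index mapping at all: it flattens the sentences once and computes each code directly as 1 + the number of distinct words occurring before the word's first occurrence in the flattened stream (len(set(flat[:flat.index(w)]))+1), replacing A's incremental counter-plus-membership dictionary construction.
import Mathlib
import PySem

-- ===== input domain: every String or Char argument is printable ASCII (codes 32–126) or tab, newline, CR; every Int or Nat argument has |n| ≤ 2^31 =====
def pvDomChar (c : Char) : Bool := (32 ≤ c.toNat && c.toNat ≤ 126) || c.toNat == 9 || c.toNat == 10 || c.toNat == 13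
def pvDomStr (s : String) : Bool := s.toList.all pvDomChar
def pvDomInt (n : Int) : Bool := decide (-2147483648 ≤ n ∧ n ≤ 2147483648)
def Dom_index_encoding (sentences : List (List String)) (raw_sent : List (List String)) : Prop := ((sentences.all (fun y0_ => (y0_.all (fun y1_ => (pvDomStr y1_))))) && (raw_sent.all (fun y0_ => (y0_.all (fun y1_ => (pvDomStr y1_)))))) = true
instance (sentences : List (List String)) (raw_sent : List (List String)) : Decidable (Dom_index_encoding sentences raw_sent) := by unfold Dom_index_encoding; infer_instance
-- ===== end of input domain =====

-- B builds no word→index mapping at all: it computes each code as 1 + the number of distinct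
-- words before the word's first occurrence in the flattened stream (alternative algorithm).


-- ===== PORT A =====
-- A's loop body on state (word2idx, idx2word, ctr)
def pvStepA (st : PySem.Dict String Int × PySem.Dict Int String × Int) (word : String) :
    PySem.Dict String Int × PySem.Dict Int String × Int :=
  if word ∈ st.1.keys then st
  else (st.1.insert word st.2.2, st.2.1.insert st.2.2 word, st.2.2 + 1)

-- A's first double loop: the final (word2idx, idx2word, ctr)
def pvBuildA (sentences : List (List String)) :
    PySem.Dict String Int × PySem.Dict Int String × Int :=
  sentences.foldl (fun st sentence => sentence.foldl pvStepA st)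
    (PySem.Dict.empty, PySem.Dict.empty, 1)

def index_encoding (sentences : List (List String)) (raw_sent : List (List String)) : List (List Int) :=
  -- word2idx[word]: KeyError (→ getD default) is excluded by Pre_index_encoding
  raw_sent.foldl
    (fun results sent => results ++ [sent.map (fun w => (((pvBuildA sentences).1).get? w).getD 0)]) []

-- ===== PORT B =====
-- len(set(flat[:flat.index(w)])) + 1; flat.index ValueError (→ the 0 arm) is excluded by Pre_index_encoding
def pvCodeB (flat : List String) (w : String) : Int :=
  match PySem.List.index? flat w with
  | some i => ((PySem.Set.ofList (PySem.List.slice flat none (some (i : Int)))).length : Int) + 1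
  | none => 0

def index_encoding_alt (sentences : List (List String)) (raw_sent : List (List String)) : List (List Int) :=
  raw_sent.map (fun sent => sent.map (fun w => pvCodeB sentences.flatten w))

-- ===== PRECONDITION & SPEC =====
-- Pre_ excludes exactly the inputs on which Python A raises KeyError: a word of raw_sent
-- that never occurs in sentences (B raises ValueError there too).
def Pre_index_encoding (sentences : List (List String)) (raw_sent : List (List String)) : Prop :=
  ∀ sent ∈ raw_sent, ∀ w ∈ sent, w ∈ sentences.flatten
instance (sentences : List (List String)) (raw_sent : List (List String)) : Decidable (Pre_index_encoding sentences raw_sent) := by unfold Pre_index_encoding; infer_instance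

def pvWitness_index_encoding : List (List String) × List (List String) :=
  ([["a", "b"], ["b", "c"]], [["c", "a"], ["b"]])

def Spec_index_encoding (sentences : List (List String)) (raw_sent : List (List String)) (out : List (List Int)) : Prop := out = index_encoding_alt sentences raw_sent
instance (sentences : List (List String)) (raw_sent : List (List String)) (out : List (List Int)) : Decidable (Spec_index_encoding sentences raw_sent out) := by unfold Spec_index_encoding; infer_instance

-- ===== CLAIM (what is proved, stated in full; the proofs are below) =====
def Claim_equal_index_encoding : Prop := ∀ (sentences : List (List String)) (raw_sent : List (List String)), Dom_index_encoding sentences raw_sent → Pre_index_encoding sentences raw_sent → Spec_index_encoding sentences raw_sent (index_encoding sentences raw_sent)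

-- ===== LEMMAS AND PROOFS =====

-- the association list (w₀,1), (w₁,2), … over a word list u
def pvPairs (u : List String) : List (String × Int) :=
  (PySem.List.enumerate u 1).map (fun p => (p.2, p.1))

lemma pvEnumerate_append_singleton (xs : List String) (x : String) (s : Int) :
    PySem.List.enumerate (xs ++ [x]) s = PySem.List.enumerate xs s ++ [(s + xs.length, x)] := by
  induction xs generalizing s with
  | nil => simp [PySem.List.enumerate_cons, PySem.List.enumerate_nil]
  | cons y ys ih =>
      simp [PySem.List.enumerate_cons, ih]
      ring_nf

lemma pvPairs_fst (u : List String) : (pvPairs u).map Prod.fst = u := by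
  rw [pvPairs, List.map_map]
  exact PySem.List.map_snd_enumerate u 1

lemma pvPairs_append_singleton (u : List String) (w : String) :
    pvPairs (u ++ [w]) = pvPairs u ++ [(w, (u.length : Int) + 1)] := by
  simp [pvPairs, pvEnumerate_append_singleton]
  ring_nf

-- keys of the built dict are exactly u
lemma pvKeys_mk_pairs (u : List String) : (PySem.Dict.mk (pvPairs u)).keys = u := by
  simpa [PySem.Dict.keys] using pvPairs_fst u

-- A's word-loop, started on the dict for a deduped prefix u, produces the dict for u.update(ws)
lemma pvFoldA (ws : List String) : ∀ (u : List String) (e : PySem.Dict Int String), u.Nodup →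
    ws.foldl pvStepA (PySem.Dict.mk (pvPairs u), e, (u.length : Int) + 1)
      = ((PySem.Dict.mk (pvPairs (PySem.Set.update u ws)),
          (ws.foldl pvStepA (PySem.Dict.mk (pvPairs u), e, (u.length : Int) + 1)).2.1,
          ((PySem.Set.update u ws).length : Int) + 1)) := by
  induction ws with
  | nil => intro u e hu; simp [PySem.Set.update_nil]
  | cons w ws ih =>
      intro u e hu
      rw [PySem.Set.update_cons]
      by_cases hw : w ∈ u
      · have hstep : pvStepA (PySem.Dict.mk (pvPairs u), e, (u.length : Int) + 1) w
            = (PySem.Dict.mk (pvPairs u), e, (u.length : Int) + 1) := by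
          simp only [pvStepA, pvKeys_mk_pairs]
          rw [if_pos hw]
        rw [List.foldl_cons, hstep, PySem.Set.add_of_mem hw]
        exact ih u e hu
      · have hnc : (PySem.Dict.mk (pvPairs u)).contains w = false := by
          simp only [Bool.eq_false_iff, ne_eq, PySem.Dict.contains_iff_mem_keys, pvKeys_mk_pairs]
          exact hw
        have hstep : pvStepA (PySem.Dict.mk (pvPairs u), e, (u.length : Int) + 1) w
            = (PySem.Dict.mk (pvPairs (u ++ [w])), e.insert ((u.length : Int) + 1) w,
               ((u ++ [w]).length : Int) + 1) := by
          have hins : (PySem.Dict.mk (pvPairs u)).insert w ((u.length : Int) + 1)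
              = PySem.Dict.mk (pvPairs (u ++ [w])) := by
            apply PySem.Dict.ext
            rw [PySem.Dict.items_insert_of_not_contains (h := hnc)]
            simp [pvPairs_append_singleton]
          simp only [pvStepA, pvKeys_mk_pairs]
          rw [if_neg hw]
          simp [hins]
        rw [List.foldl_cons, hstep, PySem.Set.add_of_not_mem hw]
        have hu' : (u ++ [w]).Nodup := by
          simp [List.nodup_append, hu]
          exact fun a ha h => hw (h ▸ ha)
        have := ih (u ++ [w]) (e.insert ((u.length : Int) + 1) w) hu'
        rw [this]

-- A's word2idx is the dict of the deduped flattened stream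
lemma pvBuildA_eq (sentences : List (List String)) :
    (pvBuildA sentences).1 = PySem.Dict.mk (pvPairs (PySem.List.dedup sentences.flatten)) := by
  have hfold : pvBuildA sentences
      = sentences.flatten.foldl pvStepA (PySem.Dict.empty, PySem.Dict.empty, 1) := by
    rw [pvBuildA]
    exact List.foldl_flatten.symm
  have hempty : ((PySem.Dict.empty : PySem.Dict String Int), (PySem.Dict.empty : PySem.Dict Int String), (1 : Int))
      = (PySem.Dict.mk (pvPairs []), PySem.Dict.empty, ((List.length ([] : List String) : Int) + 1)) := by
    simp [pvPairs, PySem.List.enumerate_nil, PySem.Dict.empty]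
  rw [hfold, hempty, pvFoldA sentences.flatten [] PySem.Dict.empty List.nodup_nil]
  rw [PySem.Set.update_nil_left, ← PySem.List.dedup_eq_ofList]

-- lookup of the first occurrence of w in the enumerated association list
lemma pvLookup_enum (w : String) : ∀ (p q : List String) (s : Int), w ∉ p →
    (PySem.Dict.mk ((PySem.List.enumerate (p ++ w :: q) s).map (fun x => (x.2, x.1)))).get? w
      = some (s + p.length) := by
  intro p
  induction p with
  | nil =>
      intro q s _
      simp [PySem.List.enumerate_cons, PySem.Dict.get?_mk_cons]
  | cons a p' ih =>
      intro q s hw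
      have ha : a ≠ w := fun h => hw (h ▸ List.mem_cons_self)
      have hw' : w ∉ p' := fun h => hw (List.mem_cons_of_mem a h)
      rw [List.cons_append, PySem.List.enumerate_cons, List.map_cons, PySem.Dict.get?_mk_cons]
      simp only [beq_iff_eq, if_neg ha]
      rw [ih q (s + 1) hw']
      congr 1
      simp
      ring

-- main lemma, generalized over the already-seen distinct words u:
-- looking w up in the dict of u.update(l) gives |set(u ∪ l[:l.index(w)])| + 1
lemma pvMain (l : List String) : ∀ (u : List String) (w : String) (i : Nat),
    u.Nodup → w ∉ u → PySem.List.index? l w = some i →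
    (PySem.Dict.mk (pvPairs (PySem.Set.update u l))).get? w
      = some (((PySem.Set.update u (l.take i)).length : Int) + 1) := by
  induction l with
  | nil =>
      intro u w i _ _ hi
      rw [PySem.List.index?_eq_idxOf?] at hi
      simp at hi
  | cons x xs ih =>
      intro u w i hu hwu hi
      by_cases hx : x = w
      · subst hx
        have : i = 0 := by
          rw [PySem.List.index?_cons_self] at hi
          simpa using hi.symm
        subst this
        rw [List.take_zero, PySem.Set.update_nil, PySem.Set.update_cons,
            PySem.Set.add_of_not_mem hwu]
        -- update (u ++ [x]) xs = (u ++ [x]) ++ fresh tail, and x ∉ u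
        rw [PySem.Set.update_eq_append_filter]
        have : (u ++ [x]) ++ (PySem.Set.ofList xs).filter
            (fun y => !(PySem.Set.contains (u ++ [x]) y)) = u ++ x ::
            ((PySem.Set.ofList xs).filter (fun y => !(PySem.Set.contains (u ++ [x]) y))) := by
          simp
        rw [this, pvPairs, pvLookup_enum x u _ 1 hwu]
        congr 1
        omega
      · have hxs : PySem.List.index? xs w = some (i - 1) ∧ 1 ≤ i := by
          rw [PySem.List.index?_cons_of_ne xs hx] at hi
          cases h' : PySem.List.index? xs w with
          | none => rw [h'] at hi; simp at hi
          | some j =>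
              rw [h'] at hi
              simp at hi
              exact ⟨congrArg some (by omega), by omega⟩
        obtain ⟨hxs, hi1⟩ := hxs
        have htake : (x :: xs).take i = x :: xs.take (i - 1) := by
          obtain ⟨i', rfl⟩ : ∃ i', i = i' + 1 := ⟨i - 1, by omega⟩
          simp
        rw [htake, PySem.Set.update_cons, PySem.Set.update_cons]
        have hwu' : w ∉ PySem.Set.add u x := by
          intro h
          rcases (PySem.Set.mem_add u x w).1 h with h | h
          · exact hwu h
          · exact hx h.symm
        exact ih (PySem.Set.add u x) w (i - 1) (PySem.Set.nodup_add u x hu) hwu' hxs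

-- per-word agreement: A's dict lookup equals B's distinct-count-before-first-occurrence
lemma pvWord_eq (sentences : List (List String)) (w : String)
    (hw : w ∈ sentences.flatten) :
    (((pvBuildA sentences).1).get? w).getD 0 = pvCodeB sentences.flatten w := by
  obtain ⟨i, hi⟩ : ∃ i, PySem.List.index? sentences.flatten w = some i := by
    have := (PySem.List.index?_isSome_iff (xs := sentences.flatten) (v := w)).2 hw
    exact Option.isSome_iff_exists.1 this
  rw [pvBuildA_eq, pvCodeB, hi, PySem.List.dedup_eq_ofList, ← PySem.Set.update_nil_left]
  rw [pvMain sentences.flatten [] w i List.nodup_nil (by simp) hi]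
  rw [PySem.Set.update_nil_left]
  simp [PySem.List.slice_to_natCast]

-- ===== VERDICT (by name: the statement is the Claim_ definition above) =====
theorem index_encoding_spec : Claim_equal_index_encoding := by
  intro sentences raw_sent _ hpre
  unfold Spec_index_encoding index_encoding index_encoding_alt
  rw [PySem.List.foldl_append_singleton_eq_map]
  simp only [List.nil_append]
  apply List.map_congr_left
  intro sent hsent
  apply List.map_congr_left
  intro w hw
  exact pvWord_eq sentences w (hpre sent hsent w hw)
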